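-- pv_equiv track=rewrite | github.com/asatullayev-diyorbek/Codewars.com-Solutions | Python/6/cumulative_triangle.py | cumulative_triangle
-- ===== SOURCE A (Python) =====
-- def cumulative_triangle(n):
--     i = 1
--     k = 1
--     while k<=n:
--         if n==k:
--             return (i+i+k-1)*(i+k-1-i+1)//2
--         i += k
--         k += 1
-- ===== SOURCE B (Python) =====
-- def cumulative_triangle(n):
--     if n < 1:
--         return None
--     i = 1 + n * (n - 1) // 2
--     return (2 * i + n - 1) * n // 2
-- ===== Notes on version B (the rewrite author's own statement) =====
-- stated objective: faster
-- what changed: Replaced the O(n) while-loop that accumulates the row's starting index with the closed form i = 1 + n(n-1)//2 and an arithmetic-series sum, making it O(1).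
-- outside the precondition, e.g. on cumulative_triangle(0): A returns None, B returns None
import Mathlib
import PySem

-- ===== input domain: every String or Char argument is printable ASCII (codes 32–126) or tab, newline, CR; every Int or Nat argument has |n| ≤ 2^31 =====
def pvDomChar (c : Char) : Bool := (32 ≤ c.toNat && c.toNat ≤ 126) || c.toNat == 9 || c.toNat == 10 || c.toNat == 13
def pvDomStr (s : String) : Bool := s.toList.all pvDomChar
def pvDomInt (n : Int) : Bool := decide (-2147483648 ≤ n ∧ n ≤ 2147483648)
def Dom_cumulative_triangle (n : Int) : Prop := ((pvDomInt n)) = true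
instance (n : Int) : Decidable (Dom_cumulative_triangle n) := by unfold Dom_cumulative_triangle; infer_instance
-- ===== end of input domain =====

-- B: closed form (i = 1 + n(n-1)//2, arithmetic-series sum) instead of A's O(n) accumulation loop.
-- ===== PORT A =====
-- A's while loop: state (i, k); returns at k = n; falls through (None) when k > n.
def ctLoop (n i k : Int) : Int :=
  if k ≤ n then
    if n == k then PySem.Int.floordiv ((i + i + k - 1) * (i + k - 1 - i + 1)) 2
    else ctLoop n (i + k) (k + 1)
  else 0
termination_by (n - k).toNat
decreasing_by simp_all; omega

def cumulative_triangle (n : Int) : Int := ctLoop n 1 1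

-- ===== PORT B =====
def cumulative_triangle_alt (n : Int) : Int :=
  if n < 1 then 0  -- Python B returns None here; outside Pre_
  else
    let i := 1 + PySem.Int.floordiv (n * (n - 1)) 2
    PySem.Int.floordiv ((2 * i + n - 1) * n) 2

-- ===== PRECONDITION & SPEC =====
-- Pre_ excludes n < 1, where A's loop never runs and A returns None (not an Int).
def Pre_cumulative_triangle (n : Int) : Prop := 1 ≤ n
instance (n : Int) : Decidable (Pre_cumulative_triangle n) := by unfold Pre_cumulative_triangle; infer_instance
def pvWitness_cumulative_triangle : Int := 3

def Spec_cumulative_triangle (n : Int) (out : Int) : Prop := out = cumulative_triangle_alt n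
instance (n : Int) (out : Int) : Decidable (Spec_cumulative_triangle n out) := by unfold Spec_cumulative_triangle; infer_instance

-- ===== CLAIM (what is proved, stated in full; the proofs are below) =====
def Claim_equal_cumulative_triangle : Prop := ∀ (n : Int), Dom_cumulative_triangle n → Pre_cumulative_triangle n → Spec_cumulative_triangle n (cumulative_triangle n)

-- ===== LEMMAS AND PROOFS =====

-- ===== VERDICT (by name: the statement is the Claim_ definition above) =====
theorem ctLoop_eq (d : Nat) : ∀ (n i k : Int), 1 ≤ k → k + d = n →
    ctLoop n i k = PySem.Int.floordiv ((2 * i + (n - k) * (n + k - 1) + n - 1) * n) 2 := by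
  induction d with
  | zero =>
    intro n i k hk hd
    have hkn : n = k := by omega
    subst hkn
    rw [ctLoop, if_pos (le_refl n), if_pos (by simp)]
    congr 1
    ring
  | succ d ih =>
    intro n i k hk hd
    have hkn : k < n := by omega
    rw [ctLoop]
    have h1 : k ≤ n := le_of_lt hkn
    have h2 : ¬ (n == k) = true := by simp; omega
    rw [if_pos h1, if_neg h2]
    rw [ih n (i + k) (k + 1) (by omega) (by omega)]
    congr 1
    ring

theorem cumulative_triangle_spec : Claim_equal_cumulative_triangle := by
  unfold Claim_equal_cumulative_triangle
  intro n _ hn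
  unfold Pre_cumulative_triangle at hn
  unfold Spec_cumulative_triangle cumulative_triangle cumulative_triangle_alt
  have hA := ctLoop_eq (n - 1).toNat n 1 1 (by omega) (by omega)
  rw [hA]
  have hnot : ¬ n < 1 := by omega
  simp only [hnot, if_false]
  have heven : ∃ c : Int, n * (n - 1) = 2 * c := by
    rcases Int.even_or_odd n with ⟨c, hc⟩ | ⟨c, hc⟩
    · exact ⟨c * (n - 1), by rw [hc]; ring⟩
    · exact ⟨n * c, by rw [hc]; ring⟩
  obtain ⟨c, hc⟩ := heven
  have hdiv : PySem.Int.floordiv (n * (n - 1)) 2 = c := by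
    rw [PySem.Int.floordiv_eq_ediv_of_pos (by omega), hc]
    omega
  rw [hdiv]
  congr 1
  linear_combination n * hc
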